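-- pv_equiv track=rewrite | github.com/ApeGPT-AI/semantic-grid | infra/k8s/local/scripts/export_clickhouse_schema.py | convert_clickhouse_type_to_postgres
-- ===== SOURCE A (Python) =====
-- TYPE_MAPPING = {
--     "UInt8": "SMALLINT",
--     "UInt16": "INTEGER",
--     "UInt32": "BIGINT",
--     "UInt64": "NUMERIC(20, 0)",
--     "Int8": "SMALLINT",
--     "Int16": "SMALLINT",
--     "Int32": "INTEGER",
--     "Int64": "BIGINT",
--     "Float32": "REAL",
--     "Float64": "DOUBLE PRECISION",
--     "String": "TEXT",
--     "FixedString": "VARCHAR",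
--     "Date": "DATE",
--     "DateTime": "TIMESTAMP",
--     "DateTime64": "TIMESTAMP",
--     "Decimal": "DECIMAL",
--     "UUID": "UUID",
--     "Bool": "BOOLEAN",
--     "Nullable": "",  # Handle separately
-- }
--
-- def convert_clickhouse_type_to_postgres(ch_type: str) -> str:
--     """Convert ClickHouse type to Postgres type."""
--     # Handle Nullable
--     if ch_type.startswith("Nullable("):
--         inner_type = ch_type[9:-1]
--         return convert_clickhouse_type_to_postgres(inner_type)
--
--     # Handle Array
--     if ch_type.startswith("Array("):
--         inner_type = ch_type[6:-1]
--         pg_inner = convert_clickhouse_type_to_postgres(inner_type)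
--         return f"{pg_inner}[]"
--
--     # Handle LowCardinality
--     if ch_type.startswith("LowCardinality("):
--         inner_type = ch_type[15:-1]
--         return convert_clickhouse_type_to_postgres(inner_type)
--
--     # Direct mapping
--     for ch, pg in TYPE_MAPPING.items():
--         if ch_type.startswith(ch):
--             return pg
--
--     # Default fallback
--     return "TEXT"
-- ===== SOURCE B (Python) =====
-- TYPE_MAPPING = {
--     "UInt8": "SMALLINT",
--     "UInt16": "INTEGER",
--     "UInt32": "BIGINT",
--     "UInt64": "NUMERIC(20, 0)",
--     "Int8": "SMALLINT",
--     "Int16": "SMALLINT",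
--     "Int32": "INTEGER",
--     "Int64": "BIGINT",
--     "Float32": "REAL",
--     "Float64": "DOUBLE PRECISION",
--     "String": "TEXT",
--     "FixedString": "VARCHAR",
--     "Date": "DATE",
--     "DateTime": "TIMESTAMP",
--     "DateTime64": "TIMESTAMP",
--     "Decimal": "DECIMAL",
--     "UUID": "UUID",
--     "Bool": "BOOLEAN",
--     "Nullable": "",  # Handle separately
-- }
--
-- # wrapper table: (prefix, strip index = len(prefix), contributes-an-array-dimension?)
-- WRAPPERS = [("Nullable(", 9, False), ("Array(", 6, True), ("LowCardinality(", 15, False)]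
--
--
-- def convert_clickhouse_type_to_postgres(ch_type: str) -> str:
--     """Convert ClickHouse type to Postgres type (table-driven iterative peeling)."""
--     suffix = ""
--     core = ch_type
--     while True:
--         hit = next((t for t in WRAPPERS if core.startswith(t[0])), None)
--         if hit is None:
--             break
--         _, k, arr = hit
--         core = core[k:-1]
--         if arr:
--             suffix = "[]" + suffix
--     pg = next((pg for ch, pg in TYPE_MAPPING.items() if core.startswith(ch)), "TEXT")
--     return pg + suffix
-- ===== Notes on version B (the rewrite author's own statement) =====
-- stated objective: alternative
-- what changed: Replaces A's three hard-coded recursive wrapper branches (suffix appended on the way back out of the recursion) with a data-driven iterative loop over a wrapper table (prefix, is-array flag) that peels wrappers and accumulates the '[]' suffix up front, then a single next()/generator first-match scan of TYPE_MAPPING instead of A's explicit for loop.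
import Mathlib
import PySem

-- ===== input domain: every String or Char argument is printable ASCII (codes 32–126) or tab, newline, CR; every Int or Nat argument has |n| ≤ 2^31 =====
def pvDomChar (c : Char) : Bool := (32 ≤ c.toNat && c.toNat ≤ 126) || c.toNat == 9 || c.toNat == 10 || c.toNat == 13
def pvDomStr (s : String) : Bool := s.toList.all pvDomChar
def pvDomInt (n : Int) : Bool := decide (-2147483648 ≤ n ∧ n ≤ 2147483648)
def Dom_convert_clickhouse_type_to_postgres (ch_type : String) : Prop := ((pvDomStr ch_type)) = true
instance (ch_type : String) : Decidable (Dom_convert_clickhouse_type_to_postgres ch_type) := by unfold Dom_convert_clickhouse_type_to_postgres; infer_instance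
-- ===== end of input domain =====

-- B replaces A's three hard-coded recursive wrapper branches with a table-driven iterative loop
-- plus a first-match scan of the mapping; same return value, no speed claim.

-- termination helper: the [k:-1] slice of a nonempty string is strictly shorter
theorem pvSliceLen_lt (s : String) (a : Int) (h : 0 < s.toList.length) :
    (PySem.Str.slice s (some a) (some (-1))).toList.length < s.toList.length := by
  have hs : s ≠ "" := by intro h'; subst h'; simp at h
  rw [PySem.Str.toList_slice]
  simp [PySem.Chars.slice_eq_listSlice, PySem.List.slice, PySem.List.clampIdx, hs] at *
  omega

theorem pvStartswith_pos (s p : String) (hp : p ≠ "") (h : PySem.Str.startswith s p = true) :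
    0 < s.toList.length := by
  rw [PySem.Str.startswith_eq] at h
  have hpre := (PySem.Chars.startswith_iff _ _).mp h
  have := hpre.length_le
  have hp' : p.toList ≠ [] := by simpa using hp
  have := List.length_pos_iff.mpr hp'
  omega

-- ===== PORT A =====
def TYPE_MAPPING : List (String × String) :=
  [("UInt8", "SMALLINT"), ("UInt16", "INTEGER"), ("UInt32", "BIGINT"),
   ("UInt64", "NUMERIC(20, 0)"), ("Int8", "SMALLINT"), ("Int16", "SMALLINT"),
   ("Int32", "INTEGER"), ("Int64", "BIGINT"), ("Float32", "REAL"),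
   ("Float64", "DOUBLE PRECISION"), ("String", "TEXT"), ("FixedString", "VARCHAR"),
   ("Date", "DATE"), ("DateTime", "TIMESTAMP"), ("DateTime64", "TIMESTAMP"),
   ("Decimal", "DECIMAL"), ("UUID", "UUID"), ("Bool", "BOOLEAN"), ("Nullable", "")]

-- A's final `for ch, pg in TYPE_MAPPING.items()` loop
def pyScanMapping (ch_type : String) : List (String × String) → String
  | [] => "TEXT"
  | (ch, pg) :: rest => if PySem.Str.startswith ch_type ch then pg else pyScanMapping ch_type rest

def convert_clickhouse_type_to_postgres (ch_type : String) : String :=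
  if PySem.Str.startswith ch_type "Nullable(" then
    convert_clickhouse_type_to_postgres (PySem.Str.slice ch_type (some 9) (some (-1)))
  else if PySem.Str.startswith ch_type "Array(" then
    convert_clickhouse_type_to_postgres (PySem.Str.slice ch_type (some 6) (some (-1))) ++ "[]"
  else if PySem.Str.startswith ch_type "LowCardinality(" then
    convert_clickhouse_type_to_postgres (PySem.Str.slice ch_type (some 15) (some (-1)))
  else
    pyScanMapping ch_type TYPE_MAPPING
termination_by ch_type.toList.length
decreasing_by
  · exact pvSliceLen_lt _ _ (pvStartswith_pos _ "Nullable(" (by decide) (by assumption))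
  · exact pvSliceLen_lt _ _ (pvStartswith_pos _ "Array(" (by decide) (by assumption))
  · exact pvSliceLen_lt _ _ (pvStartswith_pos _ "LowCardinality(" (by decide) (by assumption))

-- ===== PORT B =====
-- B's wrapper table: (prefix, strip index = len(prefix), contributes-an-array-dimension?)
def WRAPPERS : List (String × Int × Bool) :=
  [("Nullable(", 9, false), ("Array(", 6, true), ("LowCardinality(", 15, false)]

-- B's `while True` loop: `next()` over the wrapper table, peel via [k:-1], accumulate suffix
def pvPeel (core suffix : String) : String × String :=
  match hf : WRAPPERS.find? (fun t => PySem.Str.startswith core t.1) with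
  | none => (core, suffix)
  | some t =>
      pvPeel (PySem.Str.slice core (some t.2.1) (some (-1)))
             (if t.2.2 then "[]" ++ suffix else suffix)
termination_by core.toList.length
decreasing_by
  have hp := List.find?_some hf
  have hmem := List.mem_of_find?_eq_some hf
  have hne : t.1 ≠ "" := by
    simp only [WRAPPERS, List.mem_cons, List.not_mem_nil, or_false] at hmem
    rcases hmem with h | h | h <;> rw [h] <;> decide
  exact pvSliceLen_lt _ _ (pvStartswith_pos _ _ hne hp)

def convert_clickhouse_type_to_postgres_alt (ch_type : String) : String :=
  let p := pvPeel ch_type ""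
  -- next((pg for ch, pg in TYPE_MAPPING.items() if core.startswith(ch)), "TEXT")
  (((TYPE_MAPPING.find? (fun q => PySem.Str.startswith p.1 q.1)).map Prod.snd).getD "TEXT") ++ p.2

-- ===== PRECONDITION & SPEC =====
def Spec_convert_clickhouse_type_to_postgres (ch_type : String) (out : String) : Prop := out = convert_clickhouse_type_to_postgres_alt ch_type
instance (ch_type : String) (out : String) : Decidable (Spec_convert_clickhouse_type_to_postgres ch_type out) := by unfold Spec_convert_clickhouse_type_to_postgres; infer_instance

-- ===== CLAIM (what is proved, stated in full; the proofs are below) =====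
def Claim_equal_convert_clickhouse_type_to_postgres : Prop := ∀ (ch_type : String), Dom_convert_clickhouse_type_to_postgres ch_type → Spec_convert_clickhouse_type_to_postgres ch_type (convert_clickhouse_type_to_postgres ch_type)

-- ===== LEMMAS AND PROOFS =====

-- evaluating B's next() over the literal wrapper table
theorem pvFind_eval (core : String) :
    WRAPPERS.find? (fun t => PySem.Str.startswith core t.1)
      = if PySem.Str.startswith core "Nullable(" then some ("Nullable(", 9, false)
        else if PySem.Str.startswith core "Array(" then some ("Array(", 6, true)
        else if PySem.Str.startswith core "LowCardinality(" then some ("LowCardinality(", 15, false)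
        else none := by
  by_cases h1 : PySem.Str.startswith core "Nullable("
  · rw [WRAPPERS, List.find?_cons_of_pos (by simpa using h1), if_pos h1]
  · rw [WRAPPERS, List.find?_cons_of_neg (by simpa using h1), if_neg h1]
    by_cases h2 : PySem.Str.startswith core "Array("
    · rw [List.find?_cons_of_pos (by simpa using h2), if_pos h2]
    · rw [List.find?_cons_of_neg (by simpa using h2), if_neg h2]
      by_cases h3 : PySem.Str.startswith core "LowCardinality("
      · rw [List.find?_cons_of_pos (by simpa using h3), if_pos h3]
      · rw [List.find?_cons_of_neg (by simpa using h3), if_neg h3]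
        rfl

-- one iteration of B's while loop, written out over the three table entries
theorem pvPeel_unfold (core suffix : String) : pvPeel core suffix =
    if PySem.Str.startswith core "Nullable(" then
      pvPeel (PySem.Str.slice core (some 9) (some (-1))) suffix
    else if PySem.Str.startswith core "Array(" then
      pvPeel (PySem.Str.slice core (some 6) (some (-1))) ("[]" ++ suffix)
    else if PySem.Str.startswith core "LowCardinality(" then
      pvPeel (PySem.Str.slice core (some 15) (some (-1))) suffix
    else (core, suffix) := by
  rw [pvPeel, pvFind_eval]
  by_cases h1 : PySem.Str.startswith core "Nullable("
  · rw [if_pos h1, if_pos h1]; rfl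
  · rw [if_neg h1, if_neg h1]
    by_cases h2 : PySem.Str.startswith core "Array("
    · rw [if_pos h2, if_pos h2]; rfl
    · rw [if_neg h2, if_neg h2]
      by_cases h3 : PySem.Str.startswith core "LowCardinality("
      · rw [if_pos h3, if_pos h3]; rfl
      · rw [if_neg h3, if_neg h3]

-- B's first-match scan via find? equals A's explicit scanning loop, on any mapping list
theorem pvScan_eq (s : String) (l : List (String × String)) :
    (((l.find? (fun q => PySem.Str.startswith s q.1)).map Prod.snd).getD "TEXT")
      = pyScanMapping s l := by
  induction l with
  | nil => rfl
  | cons hd tl ih =>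
    obtain ⟨ch, pg⟩ := hd
    simp only [PySem.Str.startswith_eq] at ih ⊢
    by_cases h : PySem.Chars.startswith s.toList ch.toList
    · simp [pyScanMapping, List.find?, h, PySem.Str.startswith_eq]
    · simp only [pyScanMapping, List.find?, PySem.Str.startswith_eq]
      simp [h, ih]

-- loop invariant: scanning the peeled core and appending the accumulated suffix equals A's recursion
theorem pvPeel_eq (ch_type suffix : String) :
    (((TYPE_MAPPING.find? (fun q => PySem.Str.startswith (pvPeel ch_type suffix).1 q.1)).map Prod.snd).getD "TEXT")
        ++ (pvPeel ch_type suffix).2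
      = convert_clickhouse_type_to_postgres ch_type ++ suffix := by
  induction hn : ch_type.toList.length using Nat.strong_induction_on generalizing ch_type suffix with
  | _ n ih =>
  subst hn
  by_cases h1 : PySem.Str.startswith ch_type "Nullable("
  · rw [pvPeel_unfold, convert_clickhouse_type_to_postgres]
    simp only [h1, if_pos]
    exact ih _ (pvSliceLen_lt _ _ (pvStartswith_pos _ "Nullable(" (by decide) h1)) _ _ rfl
  · by_cases h2 : PySem.Str.startswith ch_type "Array("
    · rw [pvPeel_unfold, convert_clickhouse_type_to_postgres]
      simp only [h1, h2, if_pos, if_neg, Bool.false_eq_true, not_false_iff]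
      rw [ih _ (pvSliceLen_lt _ _ (pvStartswith_pos _ "Array(" (by decide) h2)) _ _ rfl,
          String.append_assoc]
    · by_cases h3 : PySem.Str.startswith ch_type "LowCardinality("
      · rw [pvPeel_unfold, convert_clickhouse_type_to_postgres]
        simp only [h1, h2, h3, if_pos, if_neg, Bool.false_eq_true, not_false_iff]
        exact ih _ (pvSliceLen_lt _ _ (pvStartswith_pos _ "LowCardinality(" (by decide) h3)) _ _ rfl
      · rw [pvPeel_unfold, convert_clickhouse_type_to_postgres]
        simp only [h1, h2, h3, if_neg, Bool.false_eq_true, not_false_iff]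
        rw [pvScan_eq]

-- ===== VERDICT (by name: the statement is the Claim_ definition above) =====
theorem convert_clickhouse_type_to_postgres_spec : Claim_equal_convert_clickhouse_type_to_postgres := by
  intro ch_type _
  unfold Spec_convert_clickhouse_type_to_postgres convert_clickhouse_type_to_postgres_alt
  have := pvPeel_eq ch_type ""
  rw [String.append_empty] at this
  exact this.symm
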